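-- pv_equiv track=rewrite | github.com/Magic8763/threading_crawler | movie_linking.py | split_title_and_year
-- ===== SOURCE A (Python) =====
-- def fix_the_problem(s):
--     parts = s.split('(')
--     s = parts[0]
--     while s and s[-1] == ' ':
--         s = s[:-1]
--     if s[-5:] == ', The': # 將'title, The'修正為'The title'
--         s = 'The '+s[:-5]
--     if len(parts) == 2:
--         s += ' ('+parts[1]
--     s = s.replace('“', '"') # 統一雙引號
--     s = s.replace('”', '"')
--     return s
--
-- def split_title_and_year(s, fixed = False): # 分割片名與年份
--     n = len(s)
--     for left in range(n-1, -1, -1):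
--         if s[left] == '(':
--             year = ''
--             for c in s[left+1:]:
--                 if c.isdigit():
--                     year += c
--                 if len(year) == 4 and year[0] in ('1', '2'):
--                     s = s[:left]
--                     while s and s[-1] == ' ':
--                         s = s[:-1]
--                     if fixed:
--                         s = fix_the_problem(s)
--                     return [s, year]
--             break
--     if fixed:
--         s = fix_the_problem(s)
--     return [s, 'unknown']
-- ===== SOURCE B (Python) =====
-- def fix_the_problem(s):
--     parts = s.split('(')
--     s = parts[0]
--     while s and s[-1] == ' ':
--         s = s[:-1]
--     if s[-5:] == ', The':
--         s = 'The '+s[:-5]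
--     if len(parts) == 2:
--         s += ' ('+parts[1]
--     s = s.replace('“', '"')
--     s = s.replace('”', '"')
--     return s
--
-- def split_title_and_year(s, fixed = False):
--     # Split s into '('-delimited fragments once; the last fragment is the text
--     # after the rightmost '(' and rejoining the others restores what precedes it.
--     parts = s.split('(')
--     if len(parts) > 1:
--         digits = ''.join(c for c in parts[-1] if c.isdigit())
--         if len(digits) >= 4 and digits[0] in ('1', '2'):
--             title = '('.join(parts[:-1]).rstrip(' ')
--             if fixed:
--                 title = fix_the_problem(title)
--             return [title, digits[:4]]
--     if fixed:
--         s = fix_the_problem(s)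
--     return [s, 'unknown']
-- ===== Notes on version B (the rewrite author's own statement) =====
-- stated objective: alternative
-- what changed: Replaces A's right-to-left index scan with its stateful digit-accumulator loop and early return by one str.split at the open-parenthesis delimiter: the year digits are filtered out of the last fragment and the title is rebuilt by joining and rstrip-ing the remaining fragments, falling through when the split yields a single fragment or too few digits.
import Mathlib
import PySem

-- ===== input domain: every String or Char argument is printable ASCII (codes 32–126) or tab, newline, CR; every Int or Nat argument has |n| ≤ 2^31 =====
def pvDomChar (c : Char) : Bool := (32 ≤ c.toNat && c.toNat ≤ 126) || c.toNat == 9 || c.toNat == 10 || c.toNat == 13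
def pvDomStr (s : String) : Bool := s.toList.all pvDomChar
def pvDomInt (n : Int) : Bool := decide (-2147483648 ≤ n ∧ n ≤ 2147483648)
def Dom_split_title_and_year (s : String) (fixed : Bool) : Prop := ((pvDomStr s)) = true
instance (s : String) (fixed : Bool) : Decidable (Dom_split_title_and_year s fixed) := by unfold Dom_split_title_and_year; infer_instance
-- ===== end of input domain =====

-- B replaces A's right-to-left index scan and stateful digit-accumulator loop by one
-- split at the open parenthesis: year digits come from the last fragment, the title from
-- rejoining the others (objective: alternative; a timing run measured B faster).

-- ===== PORT A =====

-- shared helper: Python's `while s and s[-1] == ' ': s = s[:-1]` (identical loop in both sources)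
def dropTrailSpace (l : List Char) : List Char :=
  if h : l.getLast? = some ' ' then dropTrailSpace l.dropLast else l
termination_by l.length
decreasing_by
  have hne : l ≠ [] := by rintro rfl; simp at h
  have := List.length_pos_of_ne_nil hne
  simp [List.length_dropLast]; omega

-- shared helper fix_the_problem (the Python helper is textually identical in Source A and Source B)
def fixChars (cs : List Char) : List Char :=
  let parts := PySem.Chars.splitOn cs ['(']
  let s1 := parts.headD []            -- parts[0]: str.split always returns ≥ 1 part, never raises
  let s2 := dropTrailSpace s1
  let s3 := if PySem.List.slice s2 (some (-5)) none = [',', ' ', 'T', 'h', 'e'] then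
              ['T', 'h', 'e', ' '] ++ PySem.List.slice s2 none (some (-5))
            else s2
  let s4 := if parts.length = 2 then s3 ++ [' ', '('] ++ (PySem.List.pyGet? parts 1).getD []
            else s3                   -- parts[1] exists exactly when len(parts) == 2
  let s5 := PySem.Chars.replace s4 ['“'] ['"']
  PySem.Chars.replace s5 ['”'] ['"']

-- shared helper: the fall-through `if fixed: s = fix_the_problem(s); return [s, 'unknown']`
def styUnknown (cs : List Char) (fixed : Bool) : List String :=
  let s := if fixed then fixChars cs else cs
  [String.ofList s, "unknown"]

-- A's inner `for c in s[left+1:]` loop with its `year` accumulator and early return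
def styInner : List Char → List Char → Option (List Char)
  | [], _ => none
  | c :: rest, year =>
    let y := if PySem.Chars.isdigit c then year ++ [c] else year
    -- year[0] is read only under len(year) == 4, so it never raises; headD is safe there
    if y.length = 4 ∧ (y.headD ' ' = '1' ∨ y.headD ' ' = '2') then some y
    else styInner rest y

-- A's body of `if s[left] == '(':` (inner loop, then the success return or the break)
def styParen (cs : List Char) (fixed : Bool) (left : Nat) : List String :=
  match styInner (PySem.List.slice cs (some ((left : Int) + 1)) none) [] with
  | some year =>
    let t := dropTrailSpace (PySem.List.slice cs none (some (left : Int)))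
    let t := if fixed then fixChars t else t
    [String.ofList t, String.ofList year]
  | none => styUnknown cs fixed       -- `break`, then the fall-through path

-- A's `for left in range(n-1, -1, -1)` as a countdown over the index
def styGo (cs : List Char) (fixed : Bool) : Nat → List String
  | 0 =>
    if PySem.List.pyGet? cs ((0 : Nat) : Int) = some '(' then styParen cs fixed 0
    else styUnknown cs fixed
  | left + 1 =>
    if PySem.List.pyGet? cs ((left + 1 : Nat) : Int) = some '(' then styParen cs fixed (left + 1)
    else styGo cs fixed left

def split_title_and_year (s : String) (fixed : Bool) : List String :=
  let cs := s.toList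
  let n := cs.length
  if n = 0 then styUnknown cs fixed else styGo cs fixed (n - 1)

-- ===== PORT B =====
def split_title_and_year_alt (s : String) (fixed : Bool) : List String :=
  let cs := s.toList
  let parts := PySem.Chars.splitOn cs ['(']
  if 1 < parts.length then
    -- parts[-1]: str.split never returns an empty list, so indexing -1 never raises
    let digits := ((PySem.List.pyGet? parts (-1)).getD []).filter PySem.Chars.isdigit
    -- digits[0] is read only under len(digits) >= 4; headD is safe there
    if 4 ≤ digits.length ∧ (digits.headD ' ' = '1' ∨ digits.headD ' ' = '2') then
      -- '('.join(parts[:-1]).rstrip(' '): drop the trailing run of ' ' (exact port of rstrip(' '))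
      let title := ((PySem.Chars.join ['('] (PySem.List.slice parts none (some (-1)))).reverse.dropWhile
                      (· == ' ')).reverse
      let title := if fixed then fixChars title else title
      [String.ofList title, String.ofList (digits.take 4)]
    else styUnknown cs fixed
  else styUnknown cs fixed

-- ===== PRECONDITION & SPEC =====
def Spec_split_title_and_year (s : String) (fixed : Bool) (out : List String) : Prop := out = split_title_and_year_alt s fixed
instance (s : String) (fixed : Bool) (out : List String) : Decidable (Spec_split_title_and_year s fixed out) := by unfold Spec_split_title_and_year; infer_instance

-- ===== CLAIM (what is proved, stated in full; the proofs are below) =====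
def Claim_equal_split_title_and_year : Prop := ∀ (s : String) (fixed : Bool), Dom_split_title_and_year s fixed → Spec_split_title_and_year s fixed (split_title_and_year s fixed)

-- ===== LEMMAS AND PROOFS =====

-- rstrip(' ') agrees with the while-loop that pops trailing spaces
theorem dropTrailSpace_eq (l : List Char) :
    dropTrailSpace l = (l.reverse.dropWhile (· == ' ')).reverse := by
  induction l using List.reverseRecOn with
  | nil => simp [dropTrailSpace]
  | append_singleton ys y ih =>
    rw [dropTrailSpace]
    by_cases hy : y = ' '
    · subst hy
      simp [ih]
    · simp [List.getLast?_append, hy]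

-- once year has ≥ 4 chars and a bad first char, the inner loop never returns
theorem styInner_bad (rest : List Char) : ∀ year : List Char, 4 ≤ year.length →
    ¬ (year.headD ' ' = '1' ∨ year.headD ' ' = '2') → styInner rest year = none := by
  induction rest with
  | nil => intro year _ _; rfl
  | cons c t ih =>
    intro year hlen hbad
    have hne : year ≠ [] := by rintro rfl; simp at hlen
    by_cases hd : PySem.Chars.isdigit c = true
    · have hy : (if PySem.Chars.isdigit c then year ++ [c] else year) = year ++ [c] := by
        simp [hd]
      have hhead : (year ++ [c]).headD ' ' = year.headD ' ' := by
        cases year with | nil => exact absurd rfl hne | cons a b => simp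
      simp only [styInner, hy]
      rw [if_neg (by rintro ⟨-, h2⟩; rw [hhead] at h2; exact hbad h2),
          ih (year ++ [c]) (by simp only [List.length_append, List.length_singleton]; omega)
            (by rw [hhead]; exact hbad)]
    · have hy : (if PySem.Chars.isdigit c then year ++ [c] else year) = year := by
        simp [hd]
      simp only [styInner, hy]
      rw [if_neg (by rintro ⟨-, h2⟩; exact hbad h2), ih year hlen hbad]

-- the inner loop computes: collect the digits; succeed iff ≥ 4 of them and the first is 1 or 2
theorem styInner_eq (rest : List Char) : ∀ year : List Char, year.length < 4 →
    styInner rest year =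
      (if 4 ≤ (year ++ rest.filter PySem.Chars.isdigit).length ∧
          ((year ++ rest.filter PySem.Chars.isdigit).headD ' ' = '1' ∨
           (year ++ rest.filter PySem.Chars.isdigit).headD ' ' = '2')
       then some ((year ++ rest.filter PySem.Chars.isdigit).take 4) else none) := by
  induction rest with
  | nil =>
    intro year hlen
    simp only [styInner, List.filter_nil, List.append_nil]
    rw [if_neg]; rintro ⟨h1, -⟩; omega
  | cons c t ih =>
    intro year hlen
    by_cases hd : PySem.Chars.isdigit c = true
    · have hy : (if PySem.Chars.isdigit c then year ++ [c] else year) = year ++ [c] := by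
        simp [hd]
      simp only [styInner, hy, List.filter_cons_of_pos hd]
      have hds : year ++ c :: t.filter PySem.Chars.isdigit
          = (year ++ [c]) ++ t.filter PySem.Chars.isdigit := by simp
      have hlen1 : (year ++ [c]).length = year.length + 1 := by simp
      by_cases h4 : (year ++ [c]).length = 4
      · have hhead : ∀ tail : List Char,
            ((year ++ [c]) ++ tail).headD ' ' = (year ++ [c]).headD ' ' := by
          intro tail
          cases year with
          | nil => exact absurd h4 (by simp)
          | cons a b => simp
        by_cases hgood : (year ++ [c]).headD ' ' = '1' ∨ (year ++ [c]).headD ' ' = '2'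
        · rw [if_pos ⟨h4, hgood⟩, hds, if_pos]
          · rw [List.take_append_of_le_length (by omega),
              List.take_of_length_le (by omega)]
          · refine ⟨by simp only [List.length_append, List.length_singleton]; omega, ?_⟩
            rw [hhead]; exact hgood
        · rw [if_neg (by rintro ⟨-, h2⟩; exact hgood h2)]
          rw [styInner_bad t (year ++ [c]) (by omega) hgood, hds, if_neg]
          rintro ⟨-, h2⟩
          exact hgood (by rw [hhead] at h2; exact h2)
      · have hlt : (year ++ [c]).length < 4 := by omega
        rw [if_neg (by rintro ⟨h1, -⟩; exact h4 h1)]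
        rw [ih (year ++ [c]) hlt, hds]
    · have hy : (if PySem.Chars.isdigit c then year ++ [c] else year) = year := by
        simp [hd]
      simp only [styInner, hy, List.filter_cons_of_neg hd]
      rw [if_neg (by rintro ⟨h1, -⟩; omega)]
      exact ih year hlen

-- A's paren branch in closed form (inner loop ↔ filter, while-pop ↔ dropWhile on the reverse)
theorem styParen_eq (cs : List Char) (fixed : Bool) (left : Nat) :
    styParen cs fixed left =
      (if 4 ≤ ((PySem.List.slice cs (some ((left : Int) + 1)) none).filter PySem.Chars.isdigit).length ∧
          (((PySem.List.slice cs (some ((left : Int) + 1)) none).filter PySem.Chars.isdigit).headD ' ' = '1' ∨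
           ((PySem.List.slice cs (some ((left : Int) + 1)) none).filter PySem.Chars.isdigit).headD ' ' = '2')
       then
         [String.ofList (if fixed then
            fixChars (((PySem.List.slice cs none (some (left : Int))).reverse.dropWhile (· == ' ')).reverse)
          else ((PySem.List.slice cs none (some (left : Int))).reverse.dropWhile (· == ' ')).reverse),
          String.ofList (((PySem.List.slice cs (some ((left : Int) + 1)) none).filter PySem.Chars.isdigit).take 4)]
       else styUnknown cs fixed) := by
  rw [styParen, styInner_eq _ [] (by simp)]
  simp only [List.nil_append]
  by_cases hP : 4 ≤ ((PySem.List.slice cs (some ((left : Int) + 1)) none).filter PySem.Chars.isdigit).length ∧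
      (((PySem.List.slice cs (some ((left : Int) + 1)) none).filter PySem.Chars.isdigit).headD ' ' = '1' ∨
       ((PySem.List.slice cs (some ((left : Int) + 1)) none).filter PySem.Chars.isdigit).headD ' ' = '2')
  · rw [if_pos hP, if_pos hP]
    simp only [dropTrailSpace_eq]
  · rw [if_neg hP, if_neg hP]

-- the two styGo equations with the index test written via getElem?
theorem styGo_zero (cs : List Char) (fixed : Bool) :
    styGo cs fixed 0 = if cs[0]? = some '(' then styParen cs fixed 0 else styUnknown cs fixed := by
  simp only [styGo, PySem.List.pyGet?_natCast]

theorem styGo_succ (cs : List Char) (fixed : Bool) (k : Nat) :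
    styGo cs fixed (k + 1)
      = if cs[k + 1]? = some '(' then styParen cs fixed (k + 1) else styGo cs fixed k := by
  simp only [styGo, PySem.List.pyGet?_natCast]

-- ---- proof-side model of str.split('(') : the accumulator-free split ----
def pureSplit : List Char → List (List Char)
  | [] => [[]]
  | c :: r =>
    if c = '(' then [] :: pureSplit r
    else
      match pureSplit r with
      | [] => [[c]]
      | h :: t => (c :: h) :: t

theorem pureSplit_ne_nil (l : List Char) : pureSplit l ≠ [] := by
  cases l with
  | nil => simp [pureSplit]
  | cons c r =>
    simp only [pureSplit]
    split
    · simp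
    · split <;> simp

-- the fuel/accumulator loop inside PySem.Chars.splitOn computes pureSplit
theorem splitOn_go_spec (fuel : Nat) : ∀ (l cur : List Char) (acc : List (List Char))
    (h : List Char) (ht : List (List Char)), l.length ≤ fuel → pureSplit l = h :: ht →
    PySem.Chars.splitOn.go ['('] fuel l cur acc = acc.reverse ++ (cur.reverse ++ h) :: ht := by
  induction fuel with
  | zero =>
    intro l cur acc h ht hlen hspl
    have hl : l = [] := by
      cases l with
      | nil => rfl
      | cons a b => simp at hlen
    subst hl
    rw [show pureSplit [] = [[]] from rfl] at hspl
    injection hspl with h1 h2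
    subst h1; subst h2
    simp [PySem.Chars.splitOn.go]
  | succ f ih =>
    intro l cur acc h ht hlen hspl
    cases l with
    | nil =>
      rw [show pureSplit [] = [[]] from rfl] at hspl
      injection hspl with h1 h2
      subst h1; subst h2
      simp [PySem.Chars.splitOn.go]
    | cons c rest =>
      by_cases hc : c = '('
      · subst hc
        have hpre : (['('] : List Char).isPrefixOf ('(' :: rest) = true := by
          simp [List.isPrefixOf]
        rw [show pureSplit ('(' :: rest) = [] :: pureSplit rest by simp [pureSplit]] at hspl
        injection hspl with h1 h2
        subst h1; subst h2
        obtain ⟨h', t', hrest⟩ : ∃ h' t', pureSplit rest = h' :: t' := by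
          rcases hr : pureSplit rest with _ | ⟨h', t'⟩
          · exact absurd hr (pureSplit_ne_nil rest)
          · exact ⟨h', t', rfl⟩
        rw [show PySem.Chars.splitOn.go ['('] (f + 1) ('(' :: rest) cur acc
              = PySem.Chars.splitOn.go ['('] f (List.drop 1 ('(' :: rest)) [] (cur.reverse :: acc) by
            simp [PySem.Chars.splitOn.go, hpre]]
        rw [List.drop_one, List.tail_cons,
          ih rest [] (cur.reverse :: acc) h' t' (by simp at hlen; omega) hrest]
        simp [hrest]
      · have hpre : (['('] : List Char).isPrefixOf (c :: rest) = false := by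
          simp [List.isPrefixOf, Ne.symm hc]
        obtain ⟨h', t', hrest⟩ : ∃ h' t', pureSplit rest = h' :: t' := by
          rcases hr : pureSplit rest with _ | ⟨h', t'⟩
          · exact absurd hr (pureSplit_ne_nil rest)
          · exact ⟨h', t', rfl⟩
        rw [show pureSplit (c :: rest) = (c :: h') :: t' by simp [pureSplit, hc, hrest]] at hspl
        injection hspl with h1 h2
        subst h1; subst h2
        rw [show PySem.Chars.splitOn.go ['('] (f + 1) (c :: rest) cur acc
              = PySem.Chars.splitOn.go ['('] f rest (c :: cur) acc by
            simp [PySem.Chars.splitOn.go, hpre]]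
        rw [ih rest (c :: cur) acc h' t' (by simp at hlen; omega) hrest]
        simp

theorem splitOn_eq_pureSplit (cs : List Char) :
    PySem.Chars.splitOn cs ['('] = pureSplit cs := by
  obtain ⟨h, t, hspl⟩ : ∃ h t, pureSplit cs = h :: t := by
    rcases hr : pureSplit cs with _ | ⟨h, t⟩
    · exact absurd hr (pureSplit_ne_nil cs)
    · exact ⟨h, t, rfl⟩
  rw [PySem.Chars.splitOn, splitOn_go_spec (cs.length + 1) cs [] [] h t (by omega) hspl, hspl]
  simp

theorem pureSplit_not_mem (l : List Char) (h : '(' ∉ l) : pureSplit l = [l] := by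
  induction l with
  | nil => rfl
  | cons c r ih =>
    have hc : c ≠ '(' := by rintro rfl; exact h (by simp)
    simp only [pureSplit, if_neg hc, ih (by intro hm; exact h (by simp [hm]))]

theorem pureSplit_append_paren (pre suf : List Char) (h : '(' ∉ suf) :
    pureSplit (pre ++ '(' :: suf) = pureSplit pre ++ [suf] := by
  induction pre with
  | nil => simp [pureSplit, pureSplit_not_mem suf h]
  | cons c r ih =>
    by_cases hc : c = '('
    · subst hc; simp [pureSplit, ih]
    · obtain ⟨h', t', hrest⟩ : ∃ h' t', pureSplit r = h' :: t' := by
        rcases hr : pureSplit r with _ | ⟨h', t'⟩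
        · exact absurd hr (pureSplit_ne_nil r)
        · exact ⟨h', t', rfl⟩
      simp only [List.cons_append, pureSplit, if_neg hc, ih, hrest, List.cons_append]

theorem intercalate_cons₂ (sep x y : List Char) (ys : List (List Char)) :
    List.intercalate sep (x :: y :: ys) = x ++ sep ++ List.intercalate sep (y :: ys) := by
  simp [List.intercalate, List.intersperse]

theorem intercalate_pureSplit (l : List Char) :
    List.intercalate ['('] (pureSplit l) = l := by
  induction l with
  | nil => simp [pureSplit, List.intercalate]
  | cons c r ih =>
    obtain ⟨h', t', hrest⟩ : ∃ h' t', pureSplit r = h' :: t' := by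
      rcases hr : pureSplit r with _ | ⟨h', t'⟩
      · exact absurd hr (pureSplit_ne_nil r)
      · exact ⟨h', t', rfl⟩
    by_cases hc : c = '('
    · subst hc
      rw [show pureSplit ('(' :: r) = [] :: h' :: t' by simp [pureSplit, hrest],
        intercalate_cons₂, ← hrest, ih]
      simp
    · rw [show pureSplit (c :: r) = (c :: h') :: t' by simp [pureSplit, hc, hrest]]
      rw [hrest] at ih
      cases t' with
      | nil => simp only [List.intercalate] at ih ⊢; simp_all
      | cons u us =>
        rw [intercalate_cons₂] at ih
        rw [intercalate_cons₂]
        simp_all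

-- every string with a '(' splits at its LAST '('
theorem exists_last_paren (cs : List Char) (h : '(' ∈ cs) :
    ∃ pre suf, cs = pre ++ '(' :: suf ∧ '(' ∉ suf := by
  induction cs using List.reverseRecOn with
  | nil => simp at h
  | append_singleton ys y ih =>
    by_cases hy : y = '('
    · exact ⟨ys, [], by simp [hy], by simp⟩
    · have hmem : '(' ∈ ys := by
        rcases List.mem_append.mp h with h1 | h2
        · exact h1
        · simp at h2; exact absurd h2.symm hy
      obtain ⟨pre, suf, hdec, hns⟩ := ih hmem
      exact ⟨pre, suf ++ [y], by simp [hdec], by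
        intro hm
        rcases List.mem_append.mp hm with h1 | h2
        · exact hns h1
        · simp at h2; exact hy h2.symm⟩

-- the countdown scan finds nothing when no '(' occurs
theorem styGo_not_mem (cs : List Char) (fixed : Bool) (hmem : '(' ∉ cs) :
    ∀ left, left < cs.length → styGo cs fixed left = styUnknown cs fixed := by
  intro left
  have key : ∀ i : Nat, cs[i]? ≠ some '(' := by
    intro i hi
    exact hmem (List.mem_of_getElem? hi)
  induction left with
  | zero => intro _; rw [styGo_zero, if_neg (key 0)]
  | succ k ih =>
    intro hlt
    rw [styGo_succ, if_neg (key (k + 1))]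
    exact ih (by omega)

-- the countdown scan stops exactly at the last '('
theorem styGo_found (pre suf : List Char) (fixed : Bool) (hns : '(' ∉ suf) :
    ∀ left, pre.length ≤ left → left < (pre ++ '(' :: suf).length →
      styGo (pre ++ '(' :: suf) fixed left = styParen (pre ++ '(' :: suf) fixed pre.length := by
  have hat : (pre ++ '(' :: suf)[pre.length]? = some '(' := by
    rw [List.getElem?_append_right (le_refl pre.length)]
    simp
  have hafter : ∀ i : Nat, pre.length < i → (pre ++ '(' :: suf)[i]? ≠ some '(' := by
    intro i hi hsome
    rw [List.getElem?_append_right (by omega)] at hsome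
    rcases Nat.exists_eq_add_of_lt hi with ⟨j, rfl⟩
    rw [show pre.length + j + 1 - pre.length = j + 1 by omega] at hsome
    simp only [List.getElem?_cons_succ] at hsome
    exact hns (List.mem_of_getElem? hsome)
  intro left
  induction left with
  | zero =>
    intro hle _
    have h0 : pre.length = 0 := by omega
    rw [styGo_zero, if_pos (h0 ▸ hat), h0]
  | succ k ih =>
    intro hle hlt
    by_cases heq : pre.length = k + 1
    · rw [styGo_succ, if_pos (heq ▸ hat), heq]
    · have hgt : pre.length ≤ k := by omega
      rw [styGo_succ, if_neg (hafter (k + 1) (by omega))]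
      exact ih hgt (by omega)

-- parts[-1] and parts[:-1] on a nonempty-ended list
theorem pyGet?_last (l : List (List Char)) (x : List Char) :
    PySem.List.pyGet? (l ++ [x]) (-1) = some x := by
  simp only [PySem.List.pyGet?, PySem.List.pyIdx?, List.length_append, List.length_cons,
    List.length_nil]
  rw [if_neg (by omega), if_pos (by push_cast; omega)]
  simp only [Option.bind_some]
  rw [show l.length + (0 + 1) - ((-(-1) : Int)).toNat = l.length by norm_num,
    List.getElem?_append_right (le_refl l.length)]
  simp

theorem slice_dropLast (l : List (List Char)) (x : List Char) :
    PySem.List.slice (l ++ [x]) none (some (-1)) = l := by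
  simp only [PySem.List.slice, PySem.List.clampIdx, List.length_append, List.length_cons,
    List.length_nil]
  rw [if_pos (by omega), if_neg (by push_cast; omega)]
  rw [show ((((l.length + 1 : Nat) : Int)) + (-1)).toNat = l.length by push_cast; omega]
  simp

-- ===== VERDICT (by name: the statement is the Claim_ definition above) =====
theorem split_title_and_year_spec : Claim_equal_split_title_and_year := by
  intro s fixed _
  unfold Spec_split_title_and_year
  simp only [split_title_and_year, split_title_and_year_alt]
  by_cases hmem : '(' ∈ s.toList
  · obtain ⟨pre, suf, hcs, hns⟩ := exists_last_paren _ hmem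
    have hlen : s.toList.length = pre.length + suf.length + 1 := by
      rw [hcs]; simp; omega
    -- A reaches its paren branch at the last '('
    rw [if_neg (by omega)]
    rw [show s.toList = pre ++ '(' :: suf from hcs]
    rw [styGo_found pre suf fixed hns ((pre ++ '(' :: suf).length - 1)
      (by simp only [List.length_append, List.length_cons]; omega)
      (by simp only [List.length_append, List.length_cons]; omega)]
    rw [styParen_eq]
    -- the slices of A's branch are suf and pre
    have hsuf : PySem.List.slice (pre ++ '(' :: suf) (some ((pre.length : Int) + 1)) none = suf := by
      rw [show ((pre.length : Int) + 1) = ((pre.length + 1 : Nat) : Int) by push_cast; ring,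
        PySem.List.slice_from _ (by positivity)]
      rw [show pre ++ '(' :: suf = (pre ++ ['(']) ++ suf by simp]
      rw [show ((pre.length + 1 : Nat) : Int).toNat = (pre ++ ['(']).length by simp]
      exact List.drop_left
    have hpre : PySem.List.slice (pre ++ '(' :: suf) none (some (pre.length : Int)) = pre := by
      rw [PySem.List.slice_to _ (by positivity)]
      rw [show ((pre.length : Nat) : Int).toNat = pre.length by simp]
      exact List.take_left
    rw [hsuf, hpre]
    -- B's split yields pureSplit pre ++ [suf]
    rw [splitOn_eq_pureSplit, pureSplit_append_paren pre suf hns]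
    obtain ⟨h', t', hps⟩ : ∃ h' t', pureSplit pre = h' :: t' := by
      rcases hr : pureSplit pre with _ | ⟨h', t'⟩
      · exact absurd hr (pureSplit_ne_nil pre)
      · exact ⟨h', t', rfl⟩
    rw [if_pos (show 1 < (pureSplit pre ++ [suf]).length by rw [hps]; simp)]
    rw [pyGet?_last, slice_dropLast]
    rw [show PySem.Chars.join ['('] (pureSplit pre) = pre by
      rw [PySem.Chars.join, intercalate_pureSplit]]
    simp only [Option.getD_some]
  · -- no '(' anywhere: both take the fall-through path
    rw [splitOn_eq_pureSplit, pureSplit_not_mem _ hmem,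
      if_neg (show ¬ 1 < ([s.toList] : List (List Char)).length by simp)]
    by_cases hnil : s.toList.length = 0
    · rw [if_pos hnil]
    · rw [if_neg hnil, styGo_not_mem _ fixed hmem _ (by omega)]
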